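-- pv_equiv track=rewrite | github.com/SolanumLycopersicumX/3YP | CTNet/scripts/train_rl_8direction_smooth.py | _are_actions_similar
-- ===== SOURCE A (Python) =====
-- def _are_actions_similar(a1: int, a2: int) -> bool:
--     """判断两个动作是否相似（方向接近）"""
--     if a1 == a2:
--         return True
--
--     # 相似动作组
--     similar_groups = [
--         {0, 4, 6},  # 左侧方向: left, up_left, down_left
--         {1, 5, 7},  # 右侧方向: right, up_right, down_right
--         {2, 4, 5},  # 上方方向: up, up_left, up_right
--         {3, 6, 7},  # 下方方向: down, down_left, down_right
--     ]
--
--     for group in similar_groups: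
--         if a1 in group and a2 in group:
--             return True
--     return False
-- ===== SOURCE B (Python) =====
-- # Precomputed adjacency table: each action -> the set of other actions sharing a group with it.
-- _ADJ = {
--     0: {4, 6},
--     1: {5, 7},
--     2: {4, 5},
--     3: {6, 7},
--     4: {0, 6, 2, 5},
--     5: {1, 7, 2, 4},
--     6: {0, 4, 3, 7},
--     7: {1, 5, 3, 6},
-- }
--
--
-- def _are_actions_similar(a1: int, a2: int) -> bool:
--     return a1 == a2 or a2 in _ADJ.get(a1, set())
-- ===== Notes on version B (the rewrite author's own statement) =====
-- stated objective: idiomatic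
-- what changed: Replaces the runtime scan over four group sets with a single precomputed symmetric adjacency table and one dict lookup.
import Mathlib
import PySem

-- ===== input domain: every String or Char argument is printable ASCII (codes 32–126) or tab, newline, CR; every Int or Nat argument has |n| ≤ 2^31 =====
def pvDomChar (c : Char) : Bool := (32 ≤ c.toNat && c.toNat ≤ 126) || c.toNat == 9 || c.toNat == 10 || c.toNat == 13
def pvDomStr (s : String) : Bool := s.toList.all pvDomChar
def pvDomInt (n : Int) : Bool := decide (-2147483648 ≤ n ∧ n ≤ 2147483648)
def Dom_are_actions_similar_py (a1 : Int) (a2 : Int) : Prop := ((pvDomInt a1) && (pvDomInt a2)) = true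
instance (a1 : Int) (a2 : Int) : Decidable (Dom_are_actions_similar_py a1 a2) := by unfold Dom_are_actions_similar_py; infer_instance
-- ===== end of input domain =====

-- B replaces A's per-call scan over the four group sets with one precomputed symmetric
-- adjacency table and a single dict lookup (idiomatic; same observable behaviour).

-- ===== PORT A =====
def pvSimilarGroups : List (PySem.Set Int) :=
  [PySem.Set.ofList [0, 4, 6],
   PySem.Set.ofList [1, 5, 7],
   PySem.Set.ofList [2, 4, 5],
   PySem.Set.ofList [3, 6, 7]]

-- the 'for group in similar_groups' loop with its early return
def pvGroupLoop (a1 : Int) (a2 : Int) : List (PySem.Set Int) → Bool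
  | [] => false
  | g :: rest =>
      if PySem.Set.contains g a1 && PySem.Set.contains g a2 then true
      else pvGroupLoop a1 a2 rest

def are_actions_similar_py (a1 : Int) (a2 : Int) : Bool :=
  if a1 == a2 then true
  else pvGroupLoop a1 a2 pvSimilarGroups

-- ===== PORT B =====
def pvAdj : PySem.Dict Int (PySem.Set Int) :=
  PySem.Dict.ofList
    [(0, PySem.Set.ofList [4, 6]),
     (1, PySem.Set.ofList [5, 7]),
     (2, PySem.Set.ofList [4, 5]),
     (3, PySem.Set.ofList [6, 7]),
     (4, PySem.Set.ofList [0, 6, 2, 5]),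
     (5, PySem.Set.ofList [1, 7, 2, 4]),
     (6, PySem.Set.ofList [0, 4, 3, 7]),
     (7, PySem.Set.ofList [1, 5, 3, 6])]

def are_actions_similar_py_alt (a1 : Int) (a2 : Int) : Bool :=
  a1 == a2 || PySem.Set.contains (PySem.Dict.getD pvAdj a1 PySem.Set.empty) a2

-- ===== PRECONDITION & SPEC =====
def Spec_are_actions_similar_py (a1 : Int) (a2 : Int) (out : Bool) : Prop := out = are_actions_similar_py_alt a1 a2
instance (a1 : Int) (a2 : Int) (out : Bool) : Decidable (Spec_are_actions_similar_py a1 a2 out) := by unfold Spec_are_actions_similar_py; infer_instance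

-- ===== CLAIM (what is proved, stated in full; the proofs are below) =====
def Claim_equal_are_actions_similar_py : Prop := ∀ (a1 : Int) (a2 : Int), Dom_are_actions_similar_py a1 a2 → Spec_are_actions_similar_py a1 a2 (are_actions_similar_py a1 a2)

-- ===== LEMMAS AND PROOFS =====

theorem are_actions_similar_eq (a1 a2 : Int) :
    are_actions_similar_py a1 a2 = are_actions_similar_py_alt a1 a2 := by
  by_cases h : a1 = a2
  · simp [are_actions_similar_py, are_actions_similar_py_alt, h]
  have h2 : ¬ a2 = a1 := fun e => h e.symm
  by_cases k0 : (0:Int) = a1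
  · subst k0
    simp_all [are_actions_similar_py, are_actions_similar_py_alt, pvGroupLoop,
        pvSimilarGroups, PySem.Set.ofList, PySem.Set.contains, pvAdj,
        PySem.Dict.ofList, PySem.Dict.getD, PySem.Dict.get?, PySem.Set.empty,
        PySem.Dict.update, PySem.Dict.insert, PySem.Dict.empty]
  by_cases k1 : (1:Int) = a1
  · subst k1
    simp_all [are_actions_similar_py, are_actions_similar_py_alt, pvGroupLoop,
        pvSimilarGroups, PySem.Set.ofList, PySem.Set.contains, pvAdj,
        PySem.Dict.ofList, PySem.Dict.getD, PySem.Dict.get?, PySem.Set.empty,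
        PySem.Dict.update, PySem.Dict.insert, PySem.Dict.empty,
        List.find?]
  by_cases k2 : (2:Int) = a1
  · subst k2
    simp_all [are_actions_similar_py, are_actions_similar_py_alt, pvGroupLoop,
        pvSimilarGroups, PySem.Set.ofList, PySem.Set.contains, pvAdj,
        PySem.Dict.ofList, PySem.Dict.getD, PySem.Dict.get?, PySem.Set.empty,
        PySem.Dict.update, PySem.Dict.insert, PySem.Dict.empty,
        List.find?]
  by_cases k3 : (3:Int) = a1
  · subst k3
    simp_all [are_actions_similar_py, are_actions_similar_py_alt, pvGroupLoop,
        pvSimilarGroups, PySem.Set.ofList, PySem.Set.contains, pvAdj,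
        PySem.Dict.ofList, PySem.Dict.getD, PySem.Dict.get?, PySem.Set.empty,
        PySem.Dict.update, PySem.Dict.insert, PySem.Dict.empty,
        List.find?]
  by_cases k4 : (4:Int) = a1
  · subst k4
    simp_all [are_actions_similar_py, are_actions_similar_py_alt, pvGroupLoop,
        pvSimilarGroups, PySem.Set.ofList, PySem.Set.contains, pvAdj,
        PySem.Dict.ofList, PySem.Dict.getD, PySem.Dict.get?, PySem.Set.empty,
        PySem.Dict.update, PySem.Dict.insert, PySem.Dict.empty,
        List.find?, Bool.or_assoc]
  by_cases k5 : (5:Int) = a1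
  · subst k5
    simp_all [are_actions_similar_py, are_actions_similar_py_alt, pvGroupLoop,
        pvSimilarGroups, PySem.Set.ofList, PySem.Set.contains, pvAdj,
        PySem.Dict.ofList, PySem.Dict.getD, PySem.Dict.get?, PySem.Set.empty,
        PySem.Dict.update, PySem.Dict.insert, PySem.Dict.empty,
        List.find?, Bool.or_assoc]
  by_cases k6 : (6:Int) = a1
  · subst k6
    simp_all [are_actions_similar_py, are_actions_similar_py_alt, pvGroupLoop,
        pvSimilarGroups, PySem.Set.ofList, PySem.Set.contains, pvAdj,
        PySem.Dict.ofList, PySem.Dict.getD, PySem.Dict.get?, PySem.Set.empty,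
        PySem.Dict.update, PySem.Dict.insert, PySem.Dict.empty,
        List.find?, Bool.or_assoc]
  by_cases k7 : (7:Int) = a1
  · subst k7
    simp_all [are_actions_similar_py, are_actions_similar_py_alt, pvGroupLoop,
        pvSimilarGroups, PySem.Set.ofList, PySem.Set.contains, pvAdj,
        PySem.Dict.ofList, PySem.Dict.getD, PySem.Dict.get?, PySem.Set.empty,
        PySem.Dict.update, PySem.Dict.insert, PySem.Dict.empty,
        List.find?, Bool.or_assoc]
  have b0 : ((0:Int) == a1) = false := beq_eq_false_iff_ne.mpr k0
  have b1 : ((1:Int) == a1) = false := beq_eq_false_iff_ne.mpr k1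
  have b2 : ((2:Int) == a1) = false := beq_eq_false_iff_ne.mpr k2
  have b3 : ((3:Int) == a1) = false := beq_eq_false_iff_ne.mpr k3
  have b4 : ((4:Int) == a1) = false := beq_eq_false_iff_ne.mpr k4
  have b5 : ((5:Int) == a1) = false := beq_eq_false_iff_ne.mpr k5
  have b6 : ((6:Int) == a1) = false := beq_eq_false_iff_ne.mpr k6
  have b7 : ((7:Int) == a1) = false := beq_eq_false_iff_ne.mpr k7
  simp only [are_actions_similar_py, are_actions_similar_py_alt, pvGroupLoop,
      pvSimilarGroups, PySem.Set.ofList, PySem.Set.contains, pvAdj,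
      PySem.Dict.ofList, PySem.Dict.getD, PySem.Dict.get?, PySem.Set.empty,
      PySem.Dict.update, PySem.Dict.insert, PySem.Dict.empty]
  have m0 : a1 ≠ 0 := fun e => k0 e.symm
  have m1 : a1 ≠ 1 := fun e => k1 e.symm
  have m2 : a1 ≠ 2 := fun e => k2 e.symm
  have m3 : a1 ≠ 3 := fun e => k3 e.symm
  have m4 : a1 ≠ 4 := fun e => k4 e.symm
  have m5 : a1 ≠ 5 := fun e => k5 e.symm
  have m6 : a1 ≠ 6 := fun e => k6 e.symm
  have m7 : a1 ≠ 7 := fun e => k7 e.symm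
  simp [b0, b1, b2, b3, b4, b5, b6, b7]
  simp [h, m0, m1, m2, m3, m4, m5, m6, m7]

-- ===== VERDICT (by name: the statement is the Claim_ definition above) =====
theorem are_actions_similar_py_spec : Claim_equal_are_actions_similar_py := by
  intro a1 a2 _
  unfold Spec_are_actions_similar_py
  exact are_actions_similar_eq a1 a2
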